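-- pv_equiv track=rewrite | github.com/lcw729/Algorithm | 프로그래머스/2/60057. 문자열 압축/문자열 압축.py | solution
-- ===== SOURCE A (Python) =====
-- def solution(s):
--     answer = 0
--     minimum = len(s)
--     for l in range(1, len(s)//2+1):
--         result = calculateResult(l, s)
--         if result < minimum:
--             minimum = result
--
--     return minimum
--
-- def calculateResult(l, s):
--     lst = list()
--     count = 1
--     for idx in range(0, len(s) + 1, l): # 0 ~ 끝까지 l 간격으로
--         if idx+l >= len(s):
--             targetStr = s[idx:]
--         else:
--             targetStr = s[idx:idx+l]
--         if len(lst) > 0: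
--             if lst[len(lst) - 1] == targetStr:
--                 count += 1
--             else:
--                 if count > 1:
--                     lst.append(str(count))
--                 lst.append(targetStr)
--                 count = 1
--         else:
--             lst.append(targetStr)
--
--     return len(''.join(lst))
-- ===== SOURCE B (Python) =====
-- def solution(s):
--     n = len(s)
--     best = n
--     for l in range(1, n // 2 + 1):
--         m = n // l
--         bounds = [0] + [i for i in range(1, m)
--                         if any(s[j] != s[j - l] for j in range(i * l, (i + 1) * l))] + [m]
--         counts = [b - a for a, b in zip(bounds, bounds[1:])]
--         cost = l * (len(bounds) - 1) + n % l + sum(len(str(c)) for c in counts if c > 1)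
--         best = min(best, cost)
--     return best
-- ===== Notes on version B (the rewrite author's own statement) =====
-- stated objective: alternative
-- what changed: B never extracts or compares substrings and never builds the compressed string: for each unit length l it marks run boundaries by comparing characters at offset l (s[j] != s[j-l]), turns the boundary positions into run counts by adjacent differences of the bounds list, and computes the compressed length arithmetically as l*(number of runs) + n%l + digit costs, where A interleaves slice extraction, comparison with the last appended list entry, appending count digits and blocks, and measuring the joined list.
import Mathlib
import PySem

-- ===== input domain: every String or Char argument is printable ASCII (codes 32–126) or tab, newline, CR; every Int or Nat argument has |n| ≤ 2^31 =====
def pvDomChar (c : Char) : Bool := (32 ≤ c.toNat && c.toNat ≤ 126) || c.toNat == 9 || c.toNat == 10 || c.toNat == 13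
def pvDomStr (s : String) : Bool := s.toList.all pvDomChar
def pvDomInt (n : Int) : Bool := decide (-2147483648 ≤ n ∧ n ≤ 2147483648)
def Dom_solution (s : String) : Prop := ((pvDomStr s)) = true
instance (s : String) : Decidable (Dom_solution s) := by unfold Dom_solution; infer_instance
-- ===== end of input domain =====

-- B never extracts or compares substrings and never builds the compressed string: per unit
-- length it marks run boundaries by comparing characters at offset l, derives run counts as
-- adjacent differences of the boundary positions, and computes the length by formula;
-- objective: alternative (same asymptotic cost).

-- ===== PORT A =====
-- body of A's inner loop (the if/elif/else ladder on (lst, count))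
def calcStep (lst : List (List Char)) (count : Int) (t : List Char) :
    List (List Char) × Int :=
  if lst.length > 0 then
    if PySem.List.pyGet? lst ((lst.length : Int) - 1) = some t then
      (lst, count + 1)
    else
      ((lst ++ (if count > 1 then [PySem.Int.toChars count] else [])) ++ [t], 1)
  else
    (lst ++ [t], 1)

def calculateResult (l : Int) (cs : List Char) : Int :=
  let n : Int := cs.length
  let st := (PySem.List.pyRange 0 (n + 1) l).foldl
    (fun (st : List (List Char) × Int) idx =>
      let targetStr :=
        if n ≤ idx + l then PySem.List.slice cs (some idx)
        else PySem.List.slice cs (some idx) (some (idx + l))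
      calcStep st.1 st.2 targetStr)
    ([], 1)
  ((PySem.Chars.join [] st.1).length : Int)

def solution (s : String) : Int :=
  let cs := s.toList
  let n : Int := cs.length
  (PySem.List.pyRange 1 (PySem.Int.floordiv n 2 + 1) 1).foldl
    (fun minimum l =>
      let result := calculateResult l cs
      if result < minimum then result else minimum)
    n

-- ===== PORT B =====
def solution_alt (s : String) : Int :=
  let cs := s.toList
  let n : Int := cs.length
  (PySem.List.pyRange 1 (PySem.Int.floordiv n 2 + 1) 1).foldl
    (fun best l =>
      let m := PySem.Int.floordiv n l
      let bounds : List Int :=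
        [0] ++ ((PySem.List.pyRange 1 m 1).filter (fun i =>
            (PySem.List.pyRange (i * l) ((i + 1) * l) 1).any (fun j =>
              !(PySem.List.pyGet? cs j == PySem.List.pyGet? cs (j - l))))) ++ [m]
      let counts := (bounds.zip bounds.tail).map (fun p => p.2 - p.1)
      let cost := l * ((bounds.length : Int) - 1) + PySem.Int.mod n l
        + (counts.filter (fun c => decide (c > 1))).foldl
            (fun acc c => acc + ((PySem.Int.toChars c).length : Int)) 0
      min best cost)
    n

-- ===== PRECONDITION & SPEC =====
def Spec_solution (s : String) (out : Int) : Prop := out = solution_alt s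
instance (s : String) (out : Int) : Decidable (Spec_solution s out) := by unfold Spec_solution; infer_instance

-- ===== CLAIM (what is proved, stated in full; the proofs are below) =====
def Claim_equal_solution : Prop := ∀ (s : String), Dom_solution s → Spec_solution s (solution s)

-- ===== LEMMAS AND PROOFS =====

-- digit-count contribution of a finished run of length c
def dig (c : Int) : Int := if c > 1 then ((PySem.Int.toChars c).length : Int) else 0

-- cost of run-length-encoding the remaining blocks when the current run is block b
-- seen c times, INCLUDING the final run's digit part
def rcost : List (List Char) → List Char → Int → Int
  | [], _, c => dig c
  | t :: bs, b, c => if t = b then rcost bs b (c + 1) else dig c + t.length + rcost bs t 1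

-- same, but EXCLUDING the final run's digit part (A's loop never flushes the last count)
def pen : List (List Char) → List Char → Int → Int
  | [], _, _ => 0
  | t :: bs, b, c => if t = b then pen bs b (c + 1) else dig c + t.length + pen bs t 1

-- the run-count list: lengths of the maximal runs, current run already counted c deep
def runcounts : List (List Char) → List Char → Int → List Int
  | [], _, c => [c]
  | t :: bs, b, c => if t = b then runcounts bs b (c + 1) else c :: runcounts bs t 1

-- adjacent differences (B's zip(bounds, bounds[1:]) comprehension)
def diffs (xs : List Int) : List Int := (xs.zip xs.tail).map (fun p => p.2 - p.1)

-- block number i of unit length l (character offsets l*i … l*i+l)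
def gblk (cs : List Char) (l i : Int) : List Char :=
  PySem.List.slice cs (some (l * i)) (some (l * i + l))

def jlen (lst : List (List Char)) : Int := ((PySem.Chars.join [] lst).length : Int)

lemma join_nil_eq_flatten (lst : List (List Char)) :
    PySem.Chars.join [] lst = lst.flatten := by
  match lst with
  | [] => simp [PySem.Chars.join_nil]
  | [p] => simp [PySem.Chars.join_singleton]
  | p :: q :: rest =>
    rw [PySem.Chars.join_cons_cons, join_nil_eq_flatten (q :: rest)]
    simp

lemma jlen_append (xs ys : List (List Char)) : jlen (xs ++ ys) = jlen xs + jlen ys := by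
  simp [jlen, join_nil_eq_flatten]

lemma jlen_singleton (x : List Char) : jlen [x] = (x.length : Int) := by
  simp [jlen, join_nil_eq_flatten]

lemma jlen_dig (c : Int) : jlen (if c > 1 then [PySem.Int.toChars c] else []) = dig c := by
  by_cases h : c > 1
  · simp [h, jlen_singleton, dig]
  · simp [h, jlen, PySem.Chars.join_nil, dig]

lemma pen_append (bs : List (List Char)) (b e : List Char) (c : Int)
    (h : (b :: bs).getLast? ≠ some e) :
    pen (bs ++ [e]) b c = rcost bs b c + (e.length : Int) := by
  induction bs generalizing b c with
  | nil =>
    simp only [List.getLast?_singleton, ne_eq, Option.some.injEq] at h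
    have hne : e ≠ b := fun hh => h hh.symm
    simp only [List.nil_append, pen, rcost, if_neg hne]
    ring
  | cons t r ih =>
    rw [List.getLast?_cons_cons] at h
    simp only [List.cons_append, pen, rcost]
    by_cases htb : t = b
    · simp only [htb, if_pos rfl]
      apply ih
      subst htb
      cases r with
      | nil => simpa using h
      | cons u v => rw [List.getLast?_cons_cons] at h ⊢; exact h
    · simp only [if_neg htb]
      rw [ih t 1 h]
      ring

lemma calcStep_concat (lst : List (List Char)) (b : List Char) (c : Int) (t : List Char) :
    calcStep (lst ++ [b]) c t =
      if b = t then (lst ++ [b], c + 1)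
      else ((lst ++ [b]) ++ (if c > 1 then [PySem.Int.toChars c] else []) ++ [t], 1) := by
  have hlen : ((lst ++ [b]).length : Int) - 1 = (lst.length : Nat) := by
    simp
  have hget : PySem.List.pyGet? (lst ++ [b]) (((lst ++ [b]).length : Int) - 1) = some b := by
    rw [hlen, PySem.List.pyGet?_natCast]
    simp
  rw [calcStep]
  have hpos : (lst ++ [b]).length > 0 := by simp
  rw [if_pos hpos, hget]
  by_cases hbt : b = t
  · rw [if_pos (by rw [hbt]), if_pos hbt]
  · rw [if_neg (by simpa using hbt), if_neg hbt]

-- A's loop invariant: folding the remaining blocks from state (lst ++ [b], c)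
lemma foldA (bs : List (List Char)) (lst : List (List Char)) (b : List Char) (c : Int) :
    jlen ((bs.foldl (fun st t => calcStep st.1 st.2 t) (lst ++ [b], c)).1)
      = jlen lst + (b.length : Int) + pen bs b c := by
  induction bs generalizing lst b c with
  | nil =>
    simp [pen, jlen_append, jlen_singleton]
  | cons t r ih =>
    rw [List.foldl_cons]
    simp only [calcStep_concat]
    by_cases hbt : b = t
    · rw [if_pos hbt]
      rw [ih lst b (c + 1)]
      rw [pen, if_pos hbt.symm]
    · rw [if_neg hbt]
      rw [ih ((lst ++ [b]) ++ (if c > 1 then [PySem.Int.toChars c] else [])) t 1]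
      have ht : ¬ (t = b) := fun hh => hbt hh.symm
      rw [pen, if_neg ht, jlen_append, jlen_append, jlen_singleton, jlen_dig]
      ring

lemma blockf_len (cs : List Char) (l i : Int) (h0 : 0 ≤ i) (hl : 0 ≤ l) :
    (PySem.List.slice cs (some i) (some (i + l))).length
      = min l.toNat (cs.length - i.toNat) := by
  rw [PySem.List.slice_toNat cs h0 (by omega)]
  simp [List.length_take, List.length_drop]
  omega

lemma slice_at_end (cs : List Char) (l : Int) (hl : 0 ≤ l) :
    PySem.List.slice cs (some (cs.length : Int)) (some ((cs.length : Int) + l)) = [] := by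
  rw [PySem.List.slice_toNat cs (by positivity) (by omega)]
  simp

lemma slice_total (cs : List Char) (i l : Int) (h0 : 0 ≤ i) (hl : 0 ≤ l)
    (h : (cs.length : Int) ≤ i + l) :
    PySem.List.slice cs (some i) = PySem.List.slice cs (some i) (some (i + l)) := by
  rw [PySem.List.slice_toNat cs h0 (by omega), PySem.List.slice_from (xs := cs) h0]
  rw [List.take_of_length_le]
  simp [List.length_drop]
  omega

lemma count_ceil (n l : Int) (hl : 1 ≤ l) (hn : 1 ≤ n) :
    (n + l - 1) / l = (n - 1) / l + 1 := by
  have : n + l - 1 = (n - 1) + l * 1 := by ring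
  rw [this, Int.add_mul_ediv_left _ _ (by omega)]

lemma ediv_pred_dvd (n l : Int) (hl : 1 ≤ l) (hn : 1 ≤ n) (hd : l ∣ n) :
    (n - 1) / l = n / l - 1 := by
  obtain ⟨q, rfl⟩ := hd
  have h1 : l * q - 1 = (l - 1) + l * (q - 1) := by ring
  rw [h1, Int.add_mul_ediv_left _ _ (by omega), Int.ediv_eq_zero_of_lt (by omega) (by omega)]
  rw [Int.mul_ediv_cancel_left _ (by omega)]
  ring

lemma ediv_pred_not_dvd (n l : Int) (hl : 1 ≤ l) (hn : 1 ≤ n) (hd : ¬ l ∣ n) :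
    (n - 1) / l = n / l := by
  have hmod := Int.ediv_add_emod n l
  have hr0 : 0 ≤ n % l := Int.emod_nonneg n (by omega)
  have hrl : n % l < l := Int.emod_lt_of_pos n (by omega)
  have hr1 : 1 ≤ n % l := by
    rcases (by omega : 1 ≤ n % l ∨ n % l = 0) with h | h
    · exact h
    · exact absurd (Int.dvd_of_emod_eq_zero h) hd
  have h1 : n - 1 = (n % l - 1) + l * (n / l) := by
    have hm : l * (n / l) + n % l = n := Int.ediv_add_emod n l
    linarith
  rw [h1, Int.add_mul_ediv_left _ _ (by omega), Int.ediv_eq_zero_of_lt (by omega) (by omega)]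
  ring

lemma rsplitA (n l : Int) (hl : 1 ≤ l) (hn : 1 ≤ n) :
    PySem.List.pyRange 0 (n + 1) l
      = PySem.List.pyRange 0 n l ++ (if l ∣ n then [n] else []) := by
  rw [PySem.List.pyRange_of_pos 0 (n + 1) (by omega), PySem.List.pyRange_of_pos 0 n (by omega)]
  rw [if_pos (by omega : (0:Int) < n + 1), if_pos (by omega : (0:Int) < n)]
  have hA : (n + 1 - 0 + l - 1) / l = n / l + 1 := by
    have : n + 1 - 0 + l - 1 = n + l * 1 := by ring
    rw [this, Int.add_mul_ediv_left _ _ (by omega)]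
  have hB : (n - 0 + l - 1) / l = (n - 1) / l + 1 := by
    have : n - 0 + l - 1 = n + l - 1 := by ring
    rw [this, count_ceil n l hl hn]
  by_cases hd : l ∣ n
  · rw [if_pos hd, hA, hB, ediv_pred_dvd n l hl hn hd]
    obtain ⟨q, hq⟩ := hd
    subst hq
    rw [Int.mul_ediv_cancel_left _ (by omega : l ≠ 0)]
    have hq1 : 1 ≤ q := by nlinarith
    have ht : (q + 1).toNat = (q - 1 + 1).toNat + 1 := by omega
    rw [ht, List.range_succ, List.map_append]
    congr 1
    simp only [List.map_cons, List.map_nil]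
    have h2 : (((q - 1 + 1).toNat : Nat) : Int) = q := by omega
    rw [h2]
    ring_nf
  · rw [if_neg hd, hA, hB, ediv_pred_not_dvd n l hl hn hd]
    simp

lemma rsplitB (n l : Int) (hl : 1 ≤ l) (hln : l ≤ n) (hd : ¬ l ∣ n) :
    PySem.List.pyRange 0 n l
      = PySem.List.pyRange 0 (l * (n / l)) l ++ [l * (n / l)] := by
  have hq1 : 1 ≤ n / l := by
    rw [Int.le_ediv_iff_mul_le (by omega)]; omega
  rw [PySem.List.pyRange_of_pos 0 n (by omega), PySem.List.pyRange_of_pos 0 (l * (n / l)) (by omega)]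
  rw [if_pos (by omega : (0:Int) < n), if_pos (by nlinarith : (0:Int) < l * (n / l))]
  have hB : (n - 0 + l - 1) / l = n / l + 1 := by
    have : n - 0 + l - 1 = n + l - 1 := by ring
    rw [this, count_ceil n l hl (by omega), ediv_pred_not_dvd n l hl (by omega) hd]
  have hC : (l * (n / l) - 0 + l - 1) / l = n / l := by
    have : l * (n / l) - 0 + l - 1 = (l - 1) + l * (n / l) := by ring
    rw [this, Int.add_mul_ediv_left _ _ (by omega : l ≠ 0),
      Int.ediv_eq_zero_of_lt (by omega) (by omega)]
    ring
  rw [hB, hC]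
  have ht : (n / l + 1).toNat = (n / l).toNat + 1 := by omega
  rw [ht, List.range_succ, List.map_append]
  congr 1
  simp only [List.map_cons, List.map_nil]
  have h2 : (((n / l).toNat : Nat) : Int) = n / l := by omega
  rw [h2]
  ring_nf

-- A's index loop equals the same loop over the pre-extracted blocks
lemma foldIdx (cs : List Char) (l : Int) (hl : 1 ≤ l) (idxs : List Int)
    (h0 : ∀ i ∈ idxs, 0 ≤ i) (st : List (List Char) × Int) :
    idxs.foldl
      (fun st idx =>
        calcStep st.1 st.2
          (if (cs.length : Int) ≤ idx + l then PySem.List.slice cs (some idx)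
           else PySem.List.slice cs (some idx) (some (idx + l)))) st
      = (idxs.map (fun i => PySem.List.slice cs (some i) (some (i + l)))).foldl
          (fun st t => calcStep st.1 st.2 t) st := by
  induction idxs generalizing st with
  | nil => rfl
  | cons i r ih =>
    simp only [List.foldl_cons, List.map_cons]
    rw [ih (fun j hj => h0 j (List.mem_cons_of_mem i hj))]
    congr 2
    by_cases hcase : (cs.length : Int) ≤ i + l
    · rw [if_pos hcase, slice_total cs i l (h0 i (List.mem_cons_self)) (by omega) hcase]
    · rw [if_neg hcase]

lemma pyRange_mul (l m : Int) (hl : 0 < l) :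
    PySem.List.pyRange 0 (l * m) l = (PySem.List.pyRange 0 m 1).map (fun i => l * i) := by
  rw [PySem.List.pyRange_of_pos 0 (l * m) hl, PySem.List.pyRange_one, List.map_map]
  by_cases hm : 0 < m
  · rw [if_pos (by nlinarith)]
    have hc : (l * m - 0 + l - 1) / l = m := by
      have h1 : l * m - 0 + l - 1 = (l - 1) + l * m := by ring
      rw [h1, Int.add_mul_ediv_left _ _ (by omega), Int.ediv_eq_zero_of_lt (by omega) (by omega)]
      ring
    rw [hc]
    have h0 : m - 0 = m := by ring
    rw [h0]
    apply List.map_congr_left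
    intro k _
    simp
  · rw [if_neg (by nlinarith)]
    have h0 : (m - 0).toNat = 0 := by omega
    rw [h0]
    simp
lemma fb_eq (cs : List Char) (l : Int) (hl : 1 ≤ l) (m : Int) (hm : 0 < m) :
    (PySem.List.pyRange 0 (l * m) l).map
        (fun i => PySem.List.slice cs (some i) (some (i + l)))
      = gblk cs l 0 :: (PySem.List.pyRange 1 m 1).map (gblk cs l) := by
  rw [pyRange_mul l m (by omega), List.map_map,
    PySem.List.pyRange_one_cons (by omega : (0:Int) < m), List.map_cons]
  rfl

lemma gblk_len (cs : List Char) (l i : Int) (hl : 1 ≤ l) (hi : 0 ≤ i)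
    (hin : l * i + l ≤ (cs.length : Int)) : ((gblk cs l i).length : Int) = l := by
  have hii : 0 ≤ l * i := by positivity
  have h := blockf_len cs l (l * i) hii (by omega)
  have hrfl : gblk cs l i = PySem.List.slice cs (some (l * i)) (some (l * i + l)) := rfl
  rw [hrfl, h]
  have h2 : l.toNat ≤ cs.length - (l * i).toNat := by omega
  rw [Nat.min_eq_left h2]
  omega

lemma calcStep_nil (c : Int) (t : List Char) : calcStep [] c t = ([t], 1) := by
  simp [calcStep]

lemma per_l2 (cs : List Char) (l : Int) (hl : 1 ≤ l) (hn : 2 * l ≤ (cs.length : Int)) :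
    calculateResult l cs
      = l + rcost ((PySem.List.pyRange 1 ((cs.length : Int) / l) 1).map (gblk cs l))
              (gblk cs l 0) 1
          + ((cs.length : Int) - l * ((cs.length : Int) / l)) := by
  set n : Int := (cs.length : Int) with hn'
  set m : Int := n / l with hm'
  have hm2 : 2 ≤ m := by
    rw [hm', Int.le_ediv_iff_mul_le (by omega)]; omega
  have hlm : l * m ≤ n := by
    rw [hm']
    have h1 := Int.emod_nonneg n (by omega : l ≠ 0)
    rw [Int.emod_def] at h1
    omega
  have hg0 : ((gblk cs l 0).length : Int) = l := gblk_len cs l 0 hl (by omega) (by omega)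
  have htaillen : ∀ x ∈ (PySem.List.pyRange 1 m 1).map (gblk cs l), (x.length : Int) = l := by
    intro x hx
    obtain ⟨i, hi, rfl⟩ := List.mem_map.mp hx
    obtain ⟨hi1, him⟩ := PySem.List.mem_pyRange_one.mp hi
    exact gblk_len cs l i hl (by omega) (by nlinarith)
  have hlast : ∀ (e : List Char), (e.length : Int) ≠ l →
      (gblk cs l 0 :: (PySem.List.pyRange 1 m 1).map (gblk cs l)).getLast? ≠ some e := by
    intro e he hcon
    have hmem := List.mem_of_getLast? hcon
    rcases List.mem_cons.mp hmem with h | h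
    · exact he (h ▸ hg0)
    · exact he (htaillen e h)
  simp only [calculateResult]
  rw [foldIdx cs l hl _ (fun i hi =>
      ((PySem.List.mem_pyRange_iff_of_pos (by omega) i).mp hi).1) ([], 1)]
  rw [rsplitA n l hl (by omega), List.map_append]
  by_cases hd : l ∣ n
  · have hlmn : l * m = n := by
      obtain ⟨q, hq⟩ := hd
      rw [hm', hq, Int.mul_ediv_cancel_left _ (by omega : l ≠ 0)]
    rw [if_pos hd]
    have hfb := fb_eq cs l hl m (by omega)
    rw [hlmn] at hfb
    rw [hfb]
    have hfn : (fun i => PySem.List.slice cs (some i) (some (i + l))) n = [] :=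
      slice_at_end cs l (by omega)
    simp only [List.map_cons, List.map_nil, hfn]
    rw [List.cons_append, List.foldl_cons, calcStep_nil]
    have : ([gblk cs l 0], (1:Int)) = (([] : List (List Char)) ++ [gblk cs l 0], (1:Int)) := by simp
    rw [this]
    show jlen _ = _
    rw [foldA]
    rw [pen_append _ _ _ _ (hlast [] (by simp; omega))]
    have hjnil : jlen [] = 0 := by simp [jlen, PySem.Chars.join_nil]
    rw [hjnil, hg0]
    simp
    omega
  · rw [if_neg hd]
    rw [rsplitB n l hl (by omega) hd, List.map_append]
    rw [← hm']
    have hfb := fb_eq cs l hl m (by omega)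
    rw [hfb]
    have hlmlt : l * m < n := by
      rcases lt_or_eq_of_le hlm with h | h
      · exact h
      · exact absurd (h ▸ Dvd.intro m rfl) hd
    have hpart : ((PySem.List.slice cs (some (l * m)) (some (l * m + l))).length : Int)
        = n - l * m := by
      rw [hm']
      have hq0 : 0 ≤ n / l := by omega
      have hnn : 0 ≤ l * (n / l) := mul_nonneg (by omega) hq0
      rw [blockf_len cs l (l * (n / l)) hnn (by omega)]
      have h1 := Int.emod_lt_of_pos n (by omega : (0:Int) < l)
      have h2 := Int.emod_def n l
      have h3 : cs.length - (l * (n / l)).toNat ≤ l.toNat := by omega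
      rw [Nat.min_eq_right h3]
      omega
    simp only [List.map_cons, List.map_nil]
    rw [List.append_nil, List.cons_append, List.foldl_cons, calcStep_nil]
    have : ([gblk cs l 0], (1:Int)) = (([] : List (List Char)) ++ [gblk cs l 0], (1:Int)) := by simp
    rw [this]
    show jlen _ = _
    rw [foldA]
    rw [pen_append _ _ _ _ (hlast _ (by
      rw [hpart, hm']
      have h1 := Int.emod_lt_of_pos n (by omega : (0:Int) < l)
      have h2 := Int.emod_def n l
      omega))]
    have hjnil : jlen [] = 0 := by simp [jlen, PySem.Chars.join_nil]
    rw [hjnil, hg0, hpart]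
    ring
lemma diffs_cons_cons (a b : Int) (L : List Int) :
    diffs (a :: b :: L) = (b - a) :: diffs (b :: L) := rfl

lemma rcost_runcounts (l : Int) (bs : List (List Char)) :
    ∀ (b : List Char) (c : Int), (∀ x ∈ bs, (x.length : Int) = l) →
    rcost bs b c
      = ((runcounts bs b c).map dig).sum + l * (((runcounts bs b c).length : Int) - 1) := by
  induction bs with
  | nil => intro b c _; simp [rcost, runcounts]
  | cons t r ih =>
    intro b c hlen
    have hr : ∀ x ∈ r, (x.length : Int) = l := fun x hx => hlen x (List.mem_cons_of_mem t hx)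
    by_cases htb : t = b
    · simp only [rcost, runcounts, if_pos htb]
      exact ih b (c + 1) hr
    · simp only [rcost, runcounts, if_neg htb]
      rw [ih t 1 hr, hlen t (List.mem_cons_self)]
      simp only [List.map_cons, List.sum_cons, List.length_cons]
      push_cast
      ring

lemma runsB (g : Int → List Char) (m : Int) (k : Nat) :
    ∀ (j p : Int), (m - j).toNat = k → j ≤ m →
    runcounts ((PySem.List.pyRange j m 1).map g) (g (j - 1)) (j - p)
      = diffs (p :: (((PySem.List.pyRange j m 1).filter
            (fun i => !(g i == g (i - 1)))) ++ [m])) := by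
  induction k with
  | zero =>
    intro j p hk hj
    have hjm : j = m := by omega
    rw [hjm, PySem.List.pyRange_one_eq_nil (le_refl m)]
    simp [runcounts, diffs]
  | succ k ih =>
    intro j p hk hj
    have hjm : j < m := by omega
    rw [PySem.List.pyRange_one_cons hjm, List.map_cons, List.filter_cons]
    by_cases heq : g j = g (j - 1)
    · have hbeq : (!(g j == g (j - 1))) = false := by simp [heq]
      rw [hbeq]
      simp only [runcounts, if_pos heq, Bool.false_eq_true, if_neg (Bool.false_ne_true)]
      have hstep := ih (j + 1) p (by omega) (by omega)
      have harg : g (j + 1 - 1) = g (j - 1) := by rw [show j + 1 - 1 = j by ring, heq]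
      rw [harg] at hstep
      have hc : j + 1 - p = j - p + 1 := by ring
      rw [hc] at hstep
      exact hstep
    · have hbeq : (!(g j == g (j - 1))) = true := by simp [heq]
      rw [hbeq]
      simp only [runcounts, if_neg heq, if_pos rfl]
      have hstep := ih (j + 1) j (by omega) (by omega)
      have harg : g (j + 1 - 1) = g j := by rw [show j + 1 - 1 = j by ring]
      rw [harg] at hstep
      have hc : j + 1 - j = (1 : Int) := by ring
      rw [hc] at hstep
      simp only [if_true]
      rw [hstep, List.cons_append, diffs_cons_cons]
lemma blocks_eq_iff (cs : List Char) (A T : Nat) (hTA : T ≤ A) (hAn : A + T ≤ cs.length) :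
    ((cs.drop A).take T = (cs.drop (A - T)).take T)
      ↔ ∀ h : Nat, h < T → cs[A + h]? = cs[A - T + h]? := by
  constructor
  · intro he h hh
    have := congrArg (fun xs => xs[h]?) he
    simpa [List.getElem?_take, List.getElem?_drop, hh] using this
  · intro hp
    apply List.ext_getElem?
    intro h
    by_cases hh : h < T
    · simp only [List.getElem?_take, List.getElem?_drop, if_pos hh]
      exact hp h hh
    · simp [List.getElem?_take, hh]

lemma anyDiff_eq (cs : List Char) (l i : Int) (hl : 1 ≤ l) (hi : 1 ≤ i)
    (hin : i * l + l ≤ (cs.length : Int)) :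
    ((PySem.List.pyRange (i * l) ((i + 1) * l) 1).any (fun j =>
        !(PySem.List.pyGet? cs j == PySem.List.pyGet? cs (j - l))))
      = !(gblk cs l i == gblk cs l (i - 1)) := by
  have hcomm : i * l = l * i := mul_comm i l
  have hil0 : 0 ≤ i * l := mul_nonneg (by omega) (by omega)
  have hprev0 : 0 ≤ l * (i - 1) := mul_nonneg (by omega) (by omega)
  have hprev : l * (i - 1) = l * i - l := by ring
  set A : Nat := (i * l).toNat with hA'
  have hA : (A : Int) = i * l := by omega
  set T : Nat := l.toNat with hT'
  have hT : (T : Int) = l := by omega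
  have hTA : T ≤ A := by omega
  have hAn : A + T ≤ cs.length := by omega
  have hgi : gblk cs l i = (cs.drop A).take T := by
    rw [gblk, PySem.List.slice_toNat cs (by omega) (by omega)]
    have e1 : (l * i + l).toNat - (l * i).toNat = T := by omega
    have e2 : (l * i).toNat = A := by omega
    rw [e1, e2]
  have hgprev : gblk cs l (i - 1) = (cs.drop (A - T)).take T := by
    rw [gblk, PySem.List.slice_toNat cs (by omega) (by omega)]
    have e1 : (l * (i - 1) + l).toNat - (l * (i - 1)).toNat = T := by omega
    have e2 : (l * (i - 1)).toNat = A - T := by omega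
    rw [e1, e2]
  rw [show (i + 1) * l = i * l + l from by ring]
  by_cases hEq : gblk cs l i = gblk cs l (i - 1)
  · have hb : (gblk cs l i == gblk cs l (i - 1)) = true := beq_iff_eq.mpr hEq
    rw [hb, Bool.not_true]
    rw [List.any_eq_false]
    intro j hj
    obtain ⟨h1, h2⟩ := PySem.List.mem_pyRange_one.mp hj
    have hpoint : ∀ h : Nat, h < T → cs[A + h]? = cs[A - T + h]? := by
      rw [hgi, hgprev] at hEq
      exact (blocks_eq_iff cs A T hTA hAn).mp hEq
    have hgets : PySem.List.pyGet? cs j = PySem.List.pyGet? cs (j - l) := by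
      have e1 := PySem.List.pyGet?_natCast cs j.toNat
      rw [show ((j.toNat : Nat) : Int) = j from by omega] at e1
      have e2 := PySem.List.pyGet?_natCast cs (j - l).toNat
      rw [show (((j - l).toNat : Nat) : Int) = j - l from by omega] at e2
      rw [e1, e2]
      have hidx : j.toNat = A + (j.toNat - A) := by omega
      have hidx2 : (j - l).toNat = A - T + (j.toNat - A) := by omega
      rw [hidx, hidx2]
      exact hpoint (j.toNat - A) (by omega)
    simp [hgets]
  · have hb : (gblk cs l i == gblk cs l (i - 1)) = false := beq_eq_false_iff_ne.mpr hEq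
    rw [hb, Bool.not_false]
    rw [List.any_eq_true]
    rw [hgi, hgprev] at hEq
    have hnall : ¬ ∀ h : Nat, h < T → cs[A + h]? = cs[A - T + h]? :=
      fun hp => hEq ((blocks_eq_iff cs A T hTA hAn).mpr hp)
    push_neg at hnall
    obtain ⟨h, hh, hne⟩ := hnall
    refine ⟨i * l + (h : Int), PySem.List.mem_pyRange_one.mpr ⟨by omega, by omega⟩, ?_⟩
    have e1 := PySem.List.pyGet?_natCast cs (A + h)
    rw [show (((A + h : Nat)) : Int) = i * l + (h : Int) from by omega] at e1
    have e2 := PySem.List.pyGet?_natCast cs (A - T + h)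
    rw [show (((A - T + h : Nat)) : Int) = i * l + (h : Int) - l from by omega] at e2
    rw [e1, e2]
    simp only [Bool.not_eq_eq_eq_not, Bool.not_true, beq_eq_false_iff_ne, ne_eq]
    exact hne
-- B's loop body cost for one unit length (the let-chain of solution_alt, verbatim)
def altBody (cs : List Char) (l : Int) : Int :=
  let n : Int := cs.length
  let m := PySem.Int.floordiv n l
  let bounds : List Int :=
    [0] ++ ((PySem.List.pyRange 1 m 1).filter (fun i =>
        (PySem.List.pyRange (i * l) ((i + 1) * l) 1).any (fun j =>
          !(PySem.List.pyGet? cs j == PySem.List.pyGet? cs (j - l))))) ++ [m]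
  let counts := (bounds.zip bounds.tail).map (fun p => p.2 - p.1)
  l * ((bounds.length : Int) - 1) + PySem.Int.mod n l
    + (counts.filter (fun c => decide (c > 1))).foldl
        (fun acc c => acc + ((PySem.Int.toChars c).length : Int)) 0

lemma sum_filter_dig (xs : List Int) :
    ((xs.filter (fun c => decide (c > 1))).map
        (fun c => ((PySem.Int.toChars c).length : Int))).sum
      = (xs.map dig).sum := by
  induction xs with
  | nil => rfl
  | cons c r ih =>
    by_cases h : c > 1
    · simp [List.filter_cons, h, dig, ih]
    · simp [List.filter_cons, h, dig, ih]

lemma per_l_B (cs : List Char) (l : Int) (hl : 1 ≤ l) (hn : 2 * l ≤ (cs.length : Int)) :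
    altBody cs l = calculateResult l cs := by
  have hlpos : (0:Int) < l := by omega
  simp only [altBody, PySem.Int.floordiv_eq_ediv_of_pos hlpos,
    PySem.Int.mod_eq_emod_of_pos hlpos]
  set n : Int := (cs.length : Int) with hn'
  set m : Int := n / l with hm'
  have hm2 : 2 ≤ m := by
    rw [hm', Int.le_ediv_iff_mul_le (by omega)]; omega
  have hlm : l * m ≤ n := by
    rw [hm']
    have h1 := Int.emod_nonneg n (by omega : l ≠ 0)
    rw [Int.emod_def] at h1
    omega
  have hfilter : (PySem.List.pyRange 1 m 1).filter (fun i =>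
        (PySem.List.pyRange (i * l) ((i + 1) * l) 1).any (fun j =>
          !(PySem.List.pyGet? cs j == PySem.List.pyGet? cs (j - l))))
      = (PySem.List.pyRange 1 m 1).filter (fun i => !(gblk cs l i == gblk cs l (i - 1))) := by
    apply List.filter_congr
    intro i hi
    obtain ⟨h1, h2⟩ := PySem.List.mem_pyRange_one.mp hi
    exact anyDiff_eq cs l i hl h1 (by nlinarith)
  rw [hfilter]
  set bl := (PySem.List.pyRange 1 m 1).filter (fun i => !(gblk cs l i == gblk cs l (i - 1)))
    with hbl'
  have hruns := runsB (gblk cs l) m (m - 1).toNat 1 0 rfl (by omega)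
  rw [show (1:Int) - 1 = 0 from by ring, show (1:Int) - 0 = 1 from by ring] at hruns
  set rc := runcounts ((PySem.List.pyRange 1 m 1).map (gblk cs l)) (gblk cs l 0) 1 with hrc'
  have hbounds : ([(0:Int)] ++ bl) ++ [m] = 0 :: (bl ++ [m]) := by simp
  have hcounts : (((([(0:Int)] ++ bl) ++ [m]).zip (([(0:Int)] ++ bl) ++ [m]).tail).map
      (fun p => p.2 - p.1)) = rc := by
    rw [hbounds]
    show diffs (0 :: (bl ++ [m])) = rc
    exact hruns.symm
  rw [hcounts]
  have hrclen : rc.length = bl.length + 1 := by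
    rw [← hcounts, hbounds]
    simp [List.length_zip]
  have htaillen : ∀ x ∈ (PySem.List.pyRange 1 m 1).map (gblk cs l), (x.length : Int) = l := by
    intro x hx
    obtain ⟨i, hi, rfl⟩ := List.mem_map.mp hx
    obtain ⟨hi1, him⟩ := PySem.List.mem_pyRange_one.mp hi
    exact gblk_len cs l i hl (by omega) (by nlinarith)
  rw [per_l2 cs l hl hn]
  rw [← hn', ← hm']
  rw [rcost_runcounts l _ _ _ htaillen, ← hrc']
  rw [PySem.List.foldl_add _ _ 0, sum_filter_dig]
  rw [Int.emod_def]
  rw [← hm']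
  have hblen : ((([(0:Int)] ++ bl) ++ [m]).length : Int) = (bl.length : Int) + 2 := by
    simp
    omega
  rw [hblen]
  have hrci : (rc.length : Int) = (bl.length : Int) + 1 := by
    rw [hrclen]; push_cast; ring
  rw [hrci]
  ring

-- ===== VERDICT (by name: the statement is the Claim_ definition above) =====
theorem solution_spec : Claim_equal_solution := by
  intro s _
  unfold Spec_solution
  simp only [solution, solution_alt]
  apply PySem.List.foldl_congr_mem
  intro acc x hx
  obtain ⟨hx1, hx2⟩ := (PySem.List.mem_pyRange_one).mp hx
  have h2x : 2 * x ≤ (s.toList.length : Int) := by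
    have hle : x ≤ PySem.Int.floordiv (s.toList.length : Int) 2 := by omega
    have := (PySem.Int.le_floordiv_iff_mul_le (by omega : (0:Int) < 2)).mp hle
    omega
  show (if calculateResult x s.toList < acc then calculateResult x s.toList else acc)
      = min acc (altBody s.toList x)
  rw [per_l_B s.toList x hx1 h2x, min_def]
  split_ifs <;> omega
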